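-- pv_equiv track=rewrite | github.com/Anamooz/CSC323 | lab1/example_shift.py | bit_recovery_helper
-- ===== SOURCE A (Python) =====
-- def bit_recovery_helper(output, mask, shift, index, left_shift):
--     # Find the next shift to the left or right
--     new_indwex = 0
--     if left_shift:
--         # Base cases
--         if index >= (32 - shift):
--             return output[index]
--         new_indwex = index + shift
--     else:
--         # Base cases
--         if index < shift:
--             return output[index]
--         new_indwex = index - shift
--
--     # Recursive step
--     # Check the output bir at the current index
--     if output[index] == "1":
--         # If one check if the mask bit is 1
--         if mask[index] == "1":
--             # Check if the shifted inpyut bit is also 1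
--             # x[i + shift] = x[i] ^ x[i + shift]
--             # If it is then this bit must inside the and must be false
--             # Otherwise the and returned true and 1
--             return (
--                 "0"
--                 if bit_recovery_helper(output, mask, shift, new_indwex, left_shift)
--                 == "1"
--                 else "1"
--             )
--         else:
--             # 1 must have came from input
--             return "1"
--     else:
--         # If the output bit is 0
--         # Then check the mask bit  was 1 see if the shifted input bit was 1
--         # If shifted input is 1 then the index at the current bit must be 1
--         # Otherwise the output bit must have been 0
--         if mask[index] == "1":
--             return (
--                 "1"
--                 if bit_recovery_helper(output, mask, shift, new_indwex, left_shift)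
--                 == "1"
--                 else "0"
--             )
--         else:
--             # If mask is 0 then the output bit must have been 0
--             return "0"
-- ===== SOURCE B (Python) =====
-- def bit_recovery_helper(output, mask, shift, index, left_shift):
--     # Iterative one-pass fold of A's recursion chain: the recursion is a single
--     # chain i -> i+shift (left) / i -> i-shift (right), and each level XORs in
--     # the current output bit while the mask bit is "1"; the chain stops at the
--     # first non-"1" mask bit or at the base index.
--     if left_shift:
--         step = shift
--         def base(i):
--             return i >= 32 - shift
--     else:
--         step = -shift
--         def base(i):
--             return i < shift
--     if base(index):
--         # the top-level base case returns the character verbatim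
--         return output[index]
--     acc = False
--     i = index
--     while not base(i):
--         acc ^= (output[i] == "1")
--         if mask[i] != "1":
--             return "1" if acc else "0"
--         i += step
--     acc ^= (output[i] == "1")
--     return "1" if acc else "0"
-- ===== Notes on version B (the rewrite author's own statement) =====
-- stated objective: alternative
-- what changed: A's recursion is a single chain i -> i+/-shift; B replaces it by one iterative forward pass that XOR-accumulates the output bits along the chain, stopping at the first non-'1' mask bit or at the base index (the top-level base case still returns the character verbatim).
import Mathlib
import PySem

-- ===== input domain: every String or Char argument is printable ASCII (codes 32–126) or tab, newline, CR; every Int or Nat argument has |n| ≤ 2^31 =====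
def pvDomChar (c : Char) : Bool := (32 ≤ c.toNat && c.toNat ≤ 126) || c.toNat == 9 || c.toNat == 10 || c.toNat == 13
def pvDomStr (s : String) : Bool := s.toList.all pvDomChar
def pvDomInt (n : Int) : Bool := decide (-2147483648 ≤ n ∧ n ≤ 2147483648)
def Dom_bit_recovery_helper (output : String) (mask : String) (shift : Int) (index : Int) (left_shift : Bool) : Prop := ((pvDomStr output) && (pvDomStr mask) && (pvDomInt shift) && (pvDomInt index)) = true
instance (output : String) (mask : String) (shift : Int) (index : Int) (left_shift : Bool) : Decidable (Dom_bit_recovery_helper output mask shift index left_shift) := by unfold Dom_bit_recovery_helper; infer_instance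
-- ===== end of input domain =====

-- B replaces A's chain recursion by one iterative XOR-accumulating pass (same values on Pre_; O(1) space instead of a call stack).

-- ===== PORT A =====
-- Fuel makes the recursion total; on Pre_ the walk stops within the fuel, so fuel never runs out there.
def pvA_go (output mask : String) (shift : Int) (ls : Bool) : Nat → Int → String
  | 0, _ => ""
  | fuel+1, index =>
    -- the shared "recursive step" block of A, parameterised by new_indwex
    let rest := fun (new_indwex : Int) =>
      match PySem.Str.pyGet? output index with
      | none => ""          -- IndexError (outside Pre_)
      | some c =>
        match PySem.Str.pyGet? mask index with
        | none => ""        -- IndexError (outside Pre_)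
        | some m =>
          if c == '1' then
            if m == '1' then
              (if pvA_go output mask shift ls fuel new_indwex == "1" then "0" else "1")
            else "1"
          else
            if m == '1' then
              (if pvA_go output mask shift ls fuel new_indwex == "1" then "1" else "0")
            else "0"
    if ls then
      if 32 - shift ≤ index then
        match PySem.Str.pyGet? output index with
        | none => ""
        | some c => String.ofList [c]
      else rest (index + shift)
    else
      if index < shift then
        match PySem.Str.pyGet? output index with
        | none => ""
        | some c => String.ofList [c]
      else rest (index - shift)

def bit_recovery_helper (output : String) (mask : String) (shift : Int) (index : Int) (left_shift : Bool) : String :=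
  pvA_go output mask shift left_shift (2 * (output.length + mask.length) + 40) index

-- ===== PORT B =====
def pvB_base (shift : Int) (ls : Bool) (i : Int) : Bool :=
  if ls then decide (32 - shift ≤ i) else decide (i < shift)

def pvB_render (b : Bool) : String := if b then "1" else "0"

-- the 'while not base(i)' loop of Source B; fuel makes it total (never exhausted on Pre_)
def pvB_loop (output mask : String) (shift : Int) (ls : Bool) : Nat → Int → Bool → String
  | 0, _, _ => ""
  | fuel+1, i, acc =>
    if pvB_base shift ls i then
      match PySem.Str.pyGet? output i with
      | none => ""
      | some c => pvB_render (xor acc (c == '1'))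
    else
      match PySem.Str.pyGet? output i with
      | none => ""
      | some c =>
        let acc' := xor acc (c == '1')
        match PySem.Str.pyGet? mask i with
        | none => ""
        | some m =>
          if m ≠ '1' then pvB_render acc'
          else pvB_loop output mask shift ls fuel (i + (if ls then shift else -shift)) acc'

def bit_recovery_helper_alt (output : String) (mask : String) (shift : Int) (index : Int) (left_shift : Bool) : String :=
  if pvB_base shift left_shift index then
    match PySem.Str.pyGet? output index with
    | none => ""
    | some c => String.ofList [c]
  else pvB_loop output mask shift left_shift (2 * (output.length + mask.length) + 40) index false

-- ===== PRECONDITION & SPEC =====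
-- node j of A's walk: index + j*shift (left) / index - j*shift (right)
def pvIdx (shift index : Int) (ls : Bool) (j : Nat) : Int :=
  if ls then index + (j : Int) * shift else index - (j : Int) * shift

-- the walk continues past node j: not a base index, both reads in range, mask bit '1'
def pvCont (output mask : String) (shift index : Int) (ls : Bool) (j : Nat) : Bool :=
  !pvB_base shift ls (pvIdx shift index ls j) &&
  decide (PySem.Raise.InRange output.length (pvIdx shift index ls j)) &&
  decide (PySem.Raise.InRange mask.length (pvIdx shift index ls j)) &&
  (PySem.Str.pyGet? mask (pvIdx shift index ls j) == some '1')

-- the walk stops at node j: its reads are in range and it is a base index or its mask bit is not '1'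
def pvStop (output mask : String) (shift index : Int) (ls : Bool) (j : Nat) : Bool :=
  decide (PySem.Raise.InRange output.length (pvIdx shift index ls j)) &&
  (pvB_base shift ls (pvIdx shift index ls j) ||
    (decide (PySem.Raise.InRange mask.length (pvIdx shift index ls j)) &&
     !(PySem.Str.pyGet? mask (pvIdx shift index ls j) == some '1')))

-- Pre_ admits exactly the inputs on which A's shift/mask walk stops (at a base index or at the
-- first non-'1' mask bit) with every visited read in range; outside it A raises IndexError (an
-- out-of-range read) or RecursionError (a walk that never stops).  The bound 2(|output|+|mask|)+40
-- is never reached by an in-range stopping walk with |shift| ≥ 1 and is only nominal; Pre_ still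
-- nominally admits stopping walks deeper than CPython's recursion limit (which need ~1000
-- consecutive '1' mask bits), where A would instead raise RecursionError.
def Pre_bit_recovery_helper (output : String) (mask : String) (shift : Int) (index : Int) (left_shift : Bool) : Prop :=
  if pvB_base shift left_shift index then
    PySem.Raise.InRange output.length index
  else
    ∃ k < 2 * (output.length + mask.length) + 40,
      (∀ j < k, pvCont output mask shift index left_shift j = true) ∧
      pvStop output mask shift index left_shift k = true

instance (output : String) (mask : String) (shift : Int) (index : Int) (left_shift : Bool) : Decidable (Pre_bit_recovery_helper output mask shift index left_shift) := by unfold Pre_bit_recovery_helper; infer_instance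

def pvWitness_bit_recovery_helper : String × String × Int × Int × Bool :=
  ("0110", "1010", 1, 0, true)

def Spec_bit_recovery_helper (output : String) (mask : String) (shift : Int) (index : Int) (left_shift : Bool) (out : String) : Prop := out = bit_recovery_helper_alt output mask shift index left_shift
instance (output : String) (mask : String) (shift : Int) (index : Int) (left_shift : Bool) (out : String) : Decidable (Spec_bit_recovery_helper output mask shift index left_shift out) := by unfold Spec_bit_recovery_helper; infer_instance

-- ===== CLAIM (what is proved, stated in full; the proofs are below) =====
def Claim_equal_bit_recovery_helper : Prop := ∀ (output : String) (mask : String) (shift : Int) (index : Int) (left_shift : Bool), Dom_bit_recovery_helper output mask shift index left_shift → Pre_bit_recovery_helper output mask shift index left_shift → Spec_bit_recovery_helper output mask shift index left_shift (bit_recovery_helper output mask shift index left_shift)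

-- ===== LEMMAS AND PROOFS =====

-- the walk from node i is valid for 'fuel' more levels: every read it makes is in range
def pvValid (output mask : String) (shift : Int) (ls : Bool) : Nat → Int → Prop
  | 0, _ => False
  | fuel+1, i =>
    PySem.Raise.InRange output.length i ∧
    (pvB_base shift ls i = false →
      PySem.Raise.InRange mask.length i ∧
      (PySem.Str.pyGet? mask i = some '1' →
        pvValid output mask shift ls fuel (i + (if ls then shift else -shift))))

theorem pv_idx_zero (shift index : Int) (ls : Bool) : pvIdx shift index ls 0 = index := by
  cases ls <;> simp [pvIdx]

theorem pv_idx_succ (shift index : Int) (ls : Bool) (j : Nat) :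
    pvIdx shift index ls (j + 1) = pvIdx shift index ls j + (if ls then shift else -shift) := by
  cases ls <;> simp [pvIdx] <;> push_cast <;> ring

theorem pv_render_beq (b : Bool) : (pvB_render b == "1") = b := by cases b <;> decide

theorem pv_mk_beq (c : Char) : (String.ofList [c] == "1") = (c == '1') := by
  by_cases h : c = '1'
  · subst h; decide
  · have h1 : (String.ofList [c] == "1") = false := by
      apply beq_eq_false_iff_ne.mpr
      intro hs
      have := congrArg String.toList hs
      simp at this
      exact h this
    have h2 : (c == '1') = false := beq_eq_false_iff_ne.mpr h
    rw [h1, h2]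

theorem pv_get_some (s : String) (i : Int) (h : PySem.Raise.InRange s.length i) :
    ∃ c, PySem.Str.pyGet? s i = some c := by
  have hne : PySem.Str.pyGet? s i ≠ none := by
    rw [PySem.Str.pyGet?_eq, PySem.Chars.pyGet?_eq_listPyGet?, Ne, PySem.List.pyGet?_eq_none_iff]
    simpa using h
  exact Option.ne_none_iff_exists'.mp hne

theorem pv_s0 : (("0" : String) == "1") = false := by decide
theorem pv_s1 : (("1" : String) == "1") = true := by decide

-- the core loop invariant: along a valid walk, B's accumulator loop computes render (acc XOR bit of A's result)
theorem pv_loop_eq (output mask : String) (shift : Int) (ls : Bool) :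
    ∀ (fuel : Nat) (i : Int) (acc : Bool), pvValid output mask shift ls fuel i →
      pvB_loop output mask shift ls fuel i acc
        = pvB_render (xor acc (pvA_go output mask shift ls fuel i == "1")) := by
  intro fuel
  induction fuel with
  | zero => intro i acc hv; exact absurd hv (by simp [pvValid])
  | succ fuel ih =>
    intro i acc hv
    obtain ⟨hro, hrest⟩ := hv
    obtain ⟨c, hc0⟩ := pv_get_some output i hro
    have hc : PySem.List.pyGet? output.toList i = some c := by
      simpa [PySem.Str.pyGet?_eq, PySem.Chars.pyGet?_eq_listPyGet?] using hc0
    by_cases hb : pvB_base shift ls i = true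
    · -- base node: A returns output[i] verbatim, B XORs in its bit and renders
      cases ls
      · have hlt : i < shift := by simpa [pvB_base] using hb
        simp [pvB_loop, pvA_go, hb, hc, hlt, pv_mk_beq]
      · have hle : 32 - shift ≤ i := by simpa [pvB_base] using hb
        simp [pvB_loop, pvA_go, hb, hc, hle, pv_mk_beq]
    · -- interior node
      have hbf : pvB_base shift ls i = false := by simpa using hb
      obtain ⟨hrm, hcont⟩ := hrest hbf
      obtain ⟨m, hmk0⟩ := pv_get_some mask i hrm
      have hmk : PySem.List.pyGet? mask.toList i = some m := by
        simpa [PySem.Str.pyGet?_eq, PySem.Chars.pyGet?_eq_listPyGet?] using hmk0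
      cases ls
      · have hns : ¬ i < shift := by simpa [pvB_base] using hbf
        simp only [pvB_loop, pvA_go, hbf, Bool.false_eq_true, if_false, if_neg hns, hc0, hmk0,
          show i + -shift = i - shift from by ring]
        by_cases hm1 : m = '1'
        · have hrec := ih (i - shift) (xor acc (c == '1'))
            (by have := hcont (hm1 ▸ hmk0); simpa [show i + -shift = i - shift from by ring] using this)
          rw [if_neg (by simp [hm1]), hrec]
          by_cases hc1 : (c == '1') = true <;>
            by_cases hr : (pvA_go output mask shift false fuel (i - shift) == "1") = true <;>
              simp [hc1, hm1, hr, beq_iff_eq, pvB_render, pv_render_beq, pv_s0, pv_s1, Bool.xor_assoc]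
        · rw [if_pos (by simp [hm1])]
          by_cases hc1 : (c == '1') = true <;> simp [hc1, hm1, beq_iff_eq, pvB_render, pv_s0, pv_s1]
      · have hns : ¬ 32 - shift ≤ i := by simpa [pvB_base] using hbf
        simp only [pvB_loop, pvA_go, hbf, Bool.false_eq_true, if_false, if_true, if_neg hns, hc0, hmk0]
        by_cases hm1 : m = '1'
        · have hrec := ih (i + shift) (xor acc (c == '1'))
            (by have := hcont (hm1 ▸ hmk0); simpa using this)
          rw [if_neg (by simp [hm1]), hrec]
          by_cases hc1 : (c == '1') = true <;>
            by_cases hr : (pvA_go output mask shift true fuel (i + shift) == "1") = true <;>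
              simp [hc1, hm1, hr, beq_iff_eq, pvB_render, pv_render_beq, pv_s0, pv_s1, Bool.xor_assoc]
        · rw [if_pos (by simp [hm1])]
          by_cases hc1 : (c == '1') = true <;> simp [hc1, hm1, beq_iff_eq, pvB_render, pv_s0, pv_s1]

-- at an interior node A's value is a normalised "0"/"1"
theorem pv_norm (output mask : String) (shift : Int) (ls : Bool) (fuel : Nat) (i : Int)
    (hro : PySem.Raise.InRange output.length i) (hrm : PySem.Raise.InRange mask.length i)
    (hb : pvB_base shift ls i = false) :
    pvA_go output mask shift ls (fuel + 1) i
      = pvB_render (pvA_go output mask shift ls (fuel + 1) i == "1") := by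
  obtain ⟨c, hc0⟩ := pv_get_some output i hro
  obtain ⟨m, hmk0⟩ := pv_get_some mask i hrm
  cases ls
  · have hns : ¬ i < shift := by simpa [pvB_base] using hb
    simp only [pvA_go, if_neg hns, Bool.false_eq_true, if_false, hc0, hmk0]
    split_ifs <;> decide
  · have hns : ¬ 32 - shift ≤ i := by simpa [pvB_base] using hb
    simp only [pvA_go, if_neg hns, if_true, hc0, hmk0]
    split_ifs <;> decide

-- a walk that continues up to node k and stops there is valid at every node j ≤ k with fuel > k - j
theorem pv_chain (output mask : String) (shift index : Int) (ls : Bool) (k : Nat)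
    (hcont : ∀ j < k, pvCont output mask shift index ls j = true)
    (hstop : pvStop output mask shift index ls k = true) :
    ∀ (d : Nat), ∀ fuel, d < fuel → ∀ j, j + d = k →
      pvValid output mask shift ls fuel (pvIdx shift index ls j) := by
  intro d
  induction d with
  | zero =>
    intro fuel hf j hj
    obtain ⟨f, rfl⟩ : ∃ f, fuel = f + 1 := ⟨fuel - 1, by omega⟩
    have hjk : j = k := by omega
    subst hjk
    simp only [pvStop, Bool.and_eq_true, Bool.or_eq_true, Bool.not_eq_eq_eq_not, Bool.not_true,
      decide_eq_true_eq, beq_iff_eq, beq_eq_false_iff_ne] at hstop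
    obtain ⟨hro, hrest⟩ := hstop
    refine ⟨hro, fun hbf => ?_⟩
    rcases hrest with hbt | ⟨hm, hne⟩
    · exact absurd hbt (by simp [hbf])
    · exact ⟨hm, fun h1 => absurd h1 hne⟩
  | succ d ih =>
    intro fuel hf j hj
    obtain ⟨f, rfl⟩ : ∃ f, fuel = f + 1 := ⟨fuel - 1, by omega⟩
    have hc := hcont j (by omega)
    simp only [pvCont, Bool.and_eq_true, Bool.not_eq_eq_eq_not, Bool.not_true,
      decide_eq_true_eq, beq_iff_eq] at hc
    refine ⟨hc.1.1.2, fun _ => ⟨hc.1.2, fun _ => ?_⟩⟩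
    rw [← pv_idx_succ]
    exact ih f (by omega) (j + 1) (by omega)

-- ===== VERDICT (by name: the statement is the Claim_ definition above) =====
theorem bit_recovery_helper_spec : Claim_equal_bit_recovery_helper := by
  intro output mask shift index ls _ hpre
  unfold Pre_bit_recovery_helper at hpre
  unfold Spec_bit_recovery_helper bit_recovery_helper bit_recovery_helper_alt
  by_cases hb : pvB_base shift ls index = true
  · -- the top-level base case: both return output[index] verbatim
    rw [if_pos hb] at hpre ⊢
    obtain ⟨F, hF⟩ : ∃ F, 2 * (output.length + mask.length) + 40 = F + 1 :=
      ⟨2 * (output.length + mask.length) + 39, rfl⟩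
    rw [hF]
    cases ls
    · have hlt : index < shift := by simpa [pvB_base] using hb
      simp [pvA_go, hlt]
    · have hle : 32 - shift ≤ index := by simpa [pvB_base] using hb
      simp [pvA_go, hle]
  · have hbf : pvB_base shift ls index = false := by simpa using hb
    rw [if_neg (by simp [hbf])] at hpre
    rw [if_neg hb]
    obtain ⟨k, hk, hcont, hstop⟩ := hpre
    have hvalid : pvValid output mask shift ls (2 * (output.length + mask.length) + 40) index := by
      have := pv_chain output mask shift index ls k hcont hstop k
        (2 * (output.length + mask.length) + 40) hk 0 (by omega)
      simpa [pv_idx_zero] using this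
    rw [pv_loop_eq output mask shift ls _ index false hvalid]
    simp only [Bool.false_xor]
    obtain ⟨hro, hrest⟩ := hvalid
    obtain ⟨hrm, -⟩ := hrest hbf
    exact pv_norm output mask shift ls (2 * (output.length + mask.length) + 39) index hro hrm hbf
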